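-- pv_equiv track=rewrite | github.com/RangelGasharov/Python_Basics | algorithms/edabit_vowel_families.py | has_same_vowels
-- ===== SOURCE A (Python) =====
-- def get_vowels(word):
--     word = set(word)
--     vowels_of_word = []
--     vowels = ["a", "e", "i", "o", "u"]
--     for x in word:
--         if x in vowels:
--             vowels_of_word.append(x)
--     return vowels_of_word
--
-- def has_same_vowels(vowels_to_compare, word):
--     vowels_list = get_vowels(word)
--     for x in vowels_list:
--         if x not in vowels_to_compare:
--             return False
--     for x in vowels_to_compare:
--         if x not in vowels_list:
--             return False
--     return True
-- ===== SOURCE B (Python) =====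
-- def has_same_vowels(vowels_to_compare, word):
--     bit = {"a": 1, "e": 2, "i": 4, "o": 8, "u": 16}
--     word_mask = 0
--     for c in word:
--         word_mask |= bit.get(c, 0)
--     comp_mask = 0
--     for x in vowels_to_compare:
--         if x not in bit:
--             return False
--         comp_mask |= bit[x]
--     return word_mask == comp_mask
-- ===== Notes on version B (the rewrite author's own statement) =====
-- stated objective: alternative
-- what changed: Replaced A's dedup-then-two-containment-loops (build a vowel list from set(word), then two quadratic early-return membership scans) by two single passes that OR per-vowel bits into integer masks via a dict, returning word_mask == comp_mask.
import Mathlib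
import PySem

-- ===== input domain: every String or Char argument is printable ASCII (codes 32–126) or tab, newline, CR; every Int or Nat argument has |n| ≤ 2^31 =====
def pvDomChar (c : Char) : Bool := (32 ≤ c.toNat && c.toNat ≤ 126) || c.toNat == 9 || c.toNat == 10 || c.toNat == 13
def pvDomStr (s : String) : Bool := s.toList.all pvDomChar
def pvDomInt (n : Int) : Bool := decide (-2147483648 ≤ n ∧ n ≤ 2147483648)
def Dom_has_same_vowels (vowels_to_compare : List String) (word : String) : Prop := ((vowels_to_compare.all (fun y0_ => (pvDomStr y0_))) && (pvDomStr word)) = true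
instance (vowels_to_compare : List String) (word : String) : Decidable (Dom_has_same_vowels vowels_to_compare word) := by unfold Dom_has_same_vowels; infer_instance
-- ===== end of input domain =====

-- B replaces A's dedup-then-two-quadratic-containment-loops by two single passes
-- that OR per-vowel bits into two integer masks and compares the masks (alternative).

-- ===== PORT A =====
-- get_vowels: iterate over set(word), append the vowel characters (as 1-char strings)
def get_vowels (word : String) : List String :=
  (PySem.Set.ofList word.toList).foldl
    (fun acc x =>
      if (["a", "e", "i", "o", "u"] : List String).contains (String.mk [x])
      then acc ++ [String.mk [x]] else acc) []

-- 'for x in xs: if x not in container: return False' … 'return True'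
def hsvLoop (xs container : List String) : Bool :=
  match xs with
  | [] => true
  | x :: rest => if !container.contains x then false else hsvLoop rest container

def has_same_vowels (vowels_to_compare : List String) (word : String) : Bool :=
  let vowels_list := get_vowels word
  if hsvLoop vowels_list vowels_to_compare
  then hsvLoop vowels_to_compare vowels_list
  else false

-- ===== PORT B =====
-- bit = {"a": 1, "e": 2, "i": 4, "o": 8, "u": 16}
def vbitDict : PySem.Dict String Nat :=
  PySem.Dict.ofList [("a", 1), ("e", 2), ("i", 4), ("o", 8), ("u", 16)]

-- 'for x in vowels_to_compare: if x not in bit: return False; comp_mask |= bit[x]'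
-- (bit[x] is guarded by the containment test, so getD with default 0 is exact)
def compMaskLoop (xs : List String) (comp_mask : Nat) : Option Nat :=
  match xs with
  | [] => some comp_mask
  | x :: rest =>
    if vbitDict.contains x
    then compMaskLoop rest (comp_mask ||| vbitDict.getD x 0)
    else none

def has_same_vowels_alt (vowels_to_compare : List String) (word : String) : Bool :=
  -- 'for c in word: word_mask |= bit.get(c, 0)'
  let word_mask := word.toList.foldl
    (fun m c => m ||| vbitDict.getD (String.mk [c]) 0) 0
  match compMaskLoop vowels_to_compare 0 with
  | none => false
  | some comp_mask => word_mask == comp_mask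

-- ===== PRECONDITION & SPEC =====
def Spec_has_same_vowels (vowels_to_compare : List String) (word : String) (out : Bool) : Prop := out = has_same_vowels_alt vowels_to_compare word
instance (vowels_to_compare : List String) (word : String) (out : Bool) : Decidable (Spec_has_same_vowels vowels_to_compare word out) := by unfold Spec_has_same_vowels; infer_instance

-- ===== CLAIM (what is proved, stated in full; the proofs are below) =====
def Claim_equal_has_same_vowels : Prop := ∀ (vowels_to_compare : List String) (word : String), Dom_has_same_vowels vowels_to_compare word → Spec_has_same_vowels vowels_to_compare word (has_same_vowels vowels_to_compare word)

-- ===== LEMMAS AND PROOFS =====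

def vkeys : List String := ["a", "e", "i", "o", "u"]

def keyStr (i : Nat) : String := vkeys.getD i ""

-- string BEq against a literal, as a decide
theorem beq_lit (s a : String) : (a == s) = decide (s = a) := by
  by_cases h : s = a
  · subst h; simp
  · rw [beq_eq_false_iff_ne.mpr (Ne.symm h), decide_eq_false h]

-- the concrete 5-entry dict lookup as an if-chain
theorem vbit_eq (s : String) :
    vbitDict.getD s 0 =
      (if s = "a" then 1 else if s = "e" then 2 else if s = "i" then 4
       else if s = "o" then 8 else if s = "u" then 16 else 0) := by
  have h : vbitDict.items = [("a",1),("e",2),("i",4),("o",8),("u",16)] := by decide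
  simp only [PySem.Dict.getD, PySem.Dict.get?, h, List.find?, beq_lit]
  split_ifs <;> simp_all

theorem vcontains_eq (s : String) :
    vbitDict.contains s = decide (s ∈ vkeys) := by
  have h : vbitDict.items = [("a",1),("e",2),("i",4),("o",8),("u",16)] := by decide
  simp [PySem.Dict.contains, PySem.Dict.get?, h, List.find?, beq_lit, vkeys]

theorem vbit_lt (s : String) : vbitDict.getD s 0 < 32 := by
  rw [vbit_eq]; split_ifs <;> omega

theorem vbit_testBit (s : String) (i : Nat) (hi : i < 5) :
    (vbitDict.getD s 0).testBit i = decide (s = keyStr i) := by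
  rw [vbit_eq]
  interval_cases i <;> split_ifs <;> (try simp_all [keyStr, vkeys]) <;> decide

theorem mem_vkeys_iff (s : String) : s ∈ vkeys ↔ ∃ i, i < 5 ∧ s = keyStr i := by
  constructor
  · intro h
    fin_cases h
    · exact ⟨0, by omega, rfl⟩
    · exact ⟨1, by omega, rfl⟩
    · exact ⟨2, by omega, rfl⟩
    · exact ⟨3, by omega, rfl⟩
    · exact ⟨4, by omega, rfl⟩
  · rintro ⟨i, hi, rfl⟩
    interval_cases i <;> simp [keyStr, vkeys]

-- testBit of an OR-accumulating fold
theorem foldl_or_testBit {α : Type} (g : α → Nat) (l : List α) (acc : Nat) (i : Nat) :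
    (l.foldl (fun m x => m ||| g x) acc).testBit i =
      (acc.testBit i || l.any (fun x => (g x).testBit i)) := by
  induction l generalizing acc with
  | nil => simp
  | cons x rest ih => simp [ih, Nat.testBit_or, Bool.or_assoc]

theorem compMaskLoop_none (xs : List String) (m : Nat) :
    compMaskLoop xs m = none ↔ ∃ x ∈ xs, x ∉ vkeys := by
  induction xs generalizing m with
  | nil => simp [compMaskLoop]
  | cons x rest ih =>
    simp only [compMaskLoop, vcontains_eq]
    by_cases h : x ∈ vkeys
    · simp [h, ih]
    · simp [h]

theorem compMaskLoop_some (xs : List String) (m : Nat) (h : ∀ x ∈ xs, x ∈ vkeys) :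
    compMaskLoop xs m = some (xs.foldl (fun m x => m ||| vbitDict.getD x 0) m) := by
  induction xs generalizing m with
  | nil => simp [compMaskLoop]
  | cons x rest ih =>
    have hx : x ∈ vkeys := h x (by simp)
    simp only [compMaskLoop, vcontains_eq, decide_eq_true hx, if_pos]
    exact ih _ (fun y hy => h y (by simp [hy]))

-- A's loop returns true iff every element of xs is in container
theorem hsvLoop_eq_true_iff (xs container : List String) :
    hsvLoop xs container = true ↔ ∀ x ∈ xs, x ∈ container := by
  induction xs with
  | nil => simp [hsvLoop]
  | cons x rest ih =>
    simp only [hsvLoop]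
    by_cases h : x ∈ container
    · simp [h, ih]
    · simp [h]

-- membership in A's append-if fold
theorem mem_foldl_append_if {α β : Type} (g : α → β) (p : α → Bool)
    (l : List α) (acc : List β) (s : β) :
    s ∈ l.foldl (fun acc x => if p x then acc ++ [g x] else acc) acc ↔
      s ∈ acc ∨ ∃ c ∈ l, p c = true ∧ s = g c := by
  induction l generalizing acc with
  | nil => simp
  | cons c rest ih =>
    simp only [List.foldl_cons]
    by_cases h : p c = true
    · rw [if_pos h, ih]
      constructor
      · rintro (hm | hm)
        · rcases List.mem_append.mp hm with hm | hm
          · exact Or.inl hm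
          · exact Or.inr ⟨c, by simp, h, by simpa using hm⟩
        · rcases hm with ⟨d, hd, hp, hs⟩
          exact Or.inr ⟨d, by simp [hd], hp, hs⟩
      · rintro (hm | ⟨d, hd, hp, hs⟩)
        · exact Or.inl (List.mem_append.mpr (Or.inl hm))
        · rcases List.mem_cons.mp hd with rfl | hd
          · exact Or.inl (List.mem_append.mpr (Or.inr (by simp [hs])))
          · exact Or.inr ⟨d, hd, hp, hs⟩
    · rw [if_neg h, ih]
      constructor
      · rintro (hm | ⟨d, hd, hp, hs⟩)
        · exact Or.inl hm
        · exact Or.inr ⟨d, by simp [hd], hp, hs⟩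
      · rintro (hm | ⟨d, hd, hp, hs⟩)
        · exact Or.inl hm
        · rcases List.mem_cons.mp hd with rfl | hd
          · exact absurd hp h
          · exact Or.inr ⟨d, hd, hp, hs⟩

theorem mem_get_vowels (word : String) (s : String) :
    s ∈ get_vowels word ↔
      ∃ c ∈ word.toList, String.mk [c] ∈ vkeys ∧ s = String.mk [c] := by
  unfold get_vowels
  rw [mem_foldl_append_if]
  simp only [List.not_mem_nil, false_or, List.contains_iff_mem]
  constructor
  · rintro ⟨c, hc, hp, hs⟩
    exact ⟨c, (PySem.Set.mem_ofList _ _).mp hc, by simpa [vkeys] using hp, hs⟩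
  · rintro ⟨c, hc, hp, hs⟩
    exact ⟨c, (PySem.Set.mem_ofList _ _).mpr hc, by simpa [vkeys] using hp, hs⟩

-- characterization of A
theorem hsv_A_iff (vtc : List String) (word : String) :
    has_same_vowels vtc word = true ↔
      (∀ s ∈ get_vowels word, s ∈ vtc) ∧ (∀ x ∈ vtc, x ∈ get_vowels word) := by
  unfold has_same_vowels
  by_cases h1 : hsvLoop (get_vowels word) vtc = true
  · rw [if_pos h1, hsvLoop_eq_true_iff]
    exact ⟨fun h => ⟨(hsvLoop_eq_true_iff _ _).mp h1, h⟩, fun h => h.2⟩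
  · simp only [if_neg h1, Bool.false_eq_true, false_iff, not_and]
    intro hall
    exact absurd ((hsvLoop_eq_true_iff _ _).mpr hall) h1

-- characterization of B
theorem hsv_B_iff (vtc : List String) (word : String) :
    has_same_vowels_alt vtc word = true ↔
      (∀ x ∈ vtc, x ∈ vkeys) ∧
        (∀ i, i < 5 →
          ((∃ c ∈ word.toList, String.mk [c] = keyStr i) ↔ keyStr i ∈ vtc)) := by
  unfold has_same_vowels_alt
  by_cases hall : ∀ x ∈ vtc, x ∈ vkeys
  · rw [compMaskLoop_some vtc 0 hall]
    simp only [beq_iff_eq]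
    constructor
    · intro heq
      refine ⟨hall, fun i hi => ?_⟩
      have hbit := congrArg (fun n => n.testBit i) heq
      simp only [foldl_or_testBit, Bool.false_or, Nat.zero_testBit] at hbit
      rw [Bool.eq_iff_iff] at hbit
      simp only [List.any_eq_true, vbit_testBit _ i hi, decide_eq_true_eq] at hbit
      constructor
      · intro ⟨c, hc, hck⟩
        obtain ⟨x, hx, hxk⟩ := hbit.mp ⟨c, hc, hck⟩
        rwa [← hxk]
      · intro hk
        obtain ⟨c, hc, hck⟩ := hbit.mpr ⟨keyStr i, hk, rfl⟩
        exact ⟨c, hc, hck⟩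
    · intro ⟨_, hiff⟩
      apply Nat.eq_of_testBit_eq
      intro i
      simp only [foldl_or_testBit, Bool.false_or, Nat.zero_testBit]
      by_cases hi : i < 5
      · rw [Bool.eq_iff_iff]
        simp only [List.any_eq_true, vbit_testBit _ i hi, decide_eq_true_eq]
        constructor
        · intro ⟨c, hc, hck⟩
          exact ⟨keyStr i, (hiff i hi).mp ⟨c, hc, hck⟩, rfl⟩
        · intro ⟨x, hx, hxk⟩
          subst hxk
          exact (hiff i hi).mpr hx
      · have hb : ∀ s : String, (vbitDict.getD s 0).testBit i = false := by
          intro s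
          have h5 : (5:Nat) ≤ i := Nat.le_of_not_lt hi
          have h32 : (32:Nat) ≤ 2 ^ i := Nat.pow_le_pow_right two_pos h5
          exact Nat.testBit_lt_two_pow (lt_of_lt_of_le (vbit_lt s) h32)
        have hz : ∀ {β : Type} (l : List β) (f : β → Bool), (∀ x, f x = false) → l.any f = false := by
          intro β l f hf; induction l <;> simp_all
        rw [hz _ _ (fun c => hb (String.mk [c])), hz _ _ hb]
  · push Not at hall
    obtain ⟨x, hx, hxk⟩ := hall
    rw [(compMaskLoop_none vtc 0).mpr ⟨x, hx, hxk⟩]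
    simp only [Bool.false_eq_true, false_iff, not_and]
    intro hc
    exact absurd (hc x hx) hxk

-- ===== VERDICT (by name: the statement is the Claim_ definition above) =====
theorem has_same_vowels_spec : Claim_equal_has_same_vowels := by
  intro vtc word _
  unfold Spec_has_same_vowels
  rw [Bool.eq_iff_iff, hsv_A_iff, hsv_B_iff]
  constructor
  · rintro ⟨ha, hb⟩
    constructor
    · intro x hx
      obtain ⟨c, _, hck, rfl⟩ := (mem_get_vowels word x).mp (hb x hx)
      exact hck
    · intro i hi
      constructor
      · rintro ⟨c, hc, hck⟩
        refine ha _ ((mem_get_vowels word _).mpr ⟨c, hc, ?_, hck.symm⟩)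
        rw [hck]
        exact (mem_vkeys_iff _).mpr ⟨i, hi, rfl⟩
      · intro hk
        obtain ⟨c, hc, _, heq⟩ := (mem_get_vowels word _).mp (hb _ hk)
        exact ⟨c, hc, heq.symm⟩
  · rintro ⟨ha, hb⟩
    constructor
    · intro s hs
      obtain ⟨c, hc, hck, rfl⟩ := (mem_get_vowels word s).mp hs
      obtain ⟨i, hi, hk⟩ := (mem_vkeys_iff _).mp hck
      rw [hk]
      exact (hb i hi).mp ⟨c, hc, hk ▸ rfl⟩
    · intro x hx
      obtain ⟨i, hi, rfl⟩ := (mem_vkeys_iff x).mp (ha x hx)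
      obtain ⟨c, hc, hck⟩ := (hb i hi).mpr hx
      exact (mem_get_vowels word _).mpr ⟨c, hc, hck ▸ (mem_vkeys_iff _).mpr ⟨i, hi, rfl⟩, hck.symm⟩
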